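-- pv_equiv track=rewrite | github.com/islander-intel/boenet | train_boenet.py | format_tree_structure
-- ===== SOURCE A (Python) =====
-- def format_tree_structure(depth: int) -> str:
--     """
--     Format a visual representation of the tree structure.
--
--     Parameters
--     ----------
--     depth : int
--         Tree depth to visualize.
--
--     Returns
--     -------
--     str
--         ASCII representation of tree.
--     """
--     lines = []
--     nodes_for_depth = (1 << (depth + 1)) - 1  # get_nodes_for_depth equivalent
--     lines.append(f"Depth {depth} Tree (Total: {nodes_for_depth} nodes):")
--
--     for level in range(depth + 1):
--         num_nodes = 1 << level  # 2^level
--         node_indices = list(range((1 << level) - 1, (1 << (level + 1)) - 1))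
--         lines.append(f"  Level {level}: {num_nodes} nodes (indices {node_indices[0]}-{node_indices[-1]})")
--
--     return "\n".join(lines)
-- ===== SOURCE B (Python) =====
-- def format_tree_structure(depth: int) -> str:
--     total = (1 << (depth + 1)) - 1
--     lines = [f"Depth {depth} Tree (Total: {total} nodes):"]
--     lines += [
--         f"  Level {lv}: {1 << lv} nodes (indices {(1 << lv) - 1}-{(1 << (lv + 1)) - 2})"
--         for lv in range(depth + 1)
--     ]
--     return "\n".join(lines)
-- ===== Notes on version B (the rewrite author's own statement) =====
-- stated objective: faster
-- what changed: B computes each level's first and last node index in closed form (2^lv-1 and 2^(lv+1)-2) instead of materialising the full list of 2^lv indices per level, so total work is O(depth) arithmetic instead of O(2^depth) list construction.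
-- outside the precondition, e.g. on format_tree_structure(-2): A raises ValueError, B raises ValueError
import Mathlib
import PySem

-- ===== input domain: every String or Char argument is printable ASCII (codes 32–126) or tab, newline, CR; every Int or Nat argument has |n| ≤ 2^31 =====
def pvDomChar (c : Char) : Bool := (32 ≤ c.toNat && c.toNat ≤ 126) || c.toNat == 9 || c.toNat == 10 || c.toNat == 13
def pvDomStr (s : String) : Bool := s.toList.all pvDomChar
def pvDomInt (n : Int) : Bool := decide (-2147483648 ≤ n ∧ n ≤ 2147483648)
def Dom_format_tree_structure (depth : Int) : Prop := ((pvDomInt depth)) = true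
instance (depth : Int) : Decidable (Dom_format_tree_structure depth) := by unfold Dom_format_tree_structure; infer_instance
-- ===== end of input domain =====

-- B replaces A's per-level materialised index list by closed-form first/last indices (O(depth) vs O(2^depth)).

-- ===== PORT A =====
def format_tree_structure (depth : Int) : String :=
  let nodes_for_depth : Int := 2 ^ (depth + 1).toNat - 1
  let lines : List String :=
    ["Depth " ++ PySem.Int.toStr depth ++ " Tree (Total: " ++ PySem.Int.toStr nodes_for_depth ++ " nodes):"]
  let lines := (PySem.List.pyRange 0 (depth + 1) 1).foldl (fun lines level =>
    let num_nodes : Int := 2 ^ level.toNat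
    let node_indices : List Int :=
      PySem.List.pyRange (2 ^ level.toNat - 1) (2 ^ (level + 1).toNat - 1) 1
    lines ++ ["  Level " ++ PySem.Int.toStr level ++ ": " ++ PySem.Int.toStr num_nodes ++
      " nodes (indices " ++ PySem.Int.toStr (PySem.List.pyGetD node_indices 0 0) ++ "-" ++
      PySem.Int.toStr (PySem.List.pyGetD node_indices (-1) 0) ++ ")"]) lines
  PySem.Str.join "\n" lines

-- ===== PORT B =====
def format_tree_structure_alt (depth : Int) : String :=
  let total : Int := 2 ^ (depth + 1).toNat - 1
  let header : String :=
    "Depth " ++ PySem.Int.toStr depth ++ " Tree (Total: " ++ PySem.Int.toStr total ++ " nodes):"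
  let levels : List String := (PySem.List.pyRange 0 (depth + 1) 1).map (fun lv =>
    "  Level " ++ PySem.Int.toStr lv ++ ": " ++ PySem.Int.toStr ((2 : Int) ^ lv.toNat) ++
    " nodes (indices " ++ PySem.Int.toStr ((2 : Int) ^ lv.toNat - 1) ++ "-" ++
    PySem.Int.toStr ((2 : Int) ^ (lv + 1).toNat - 2) ++ ")")
  PySem.Str.join "\n" (header :: levels)

-- ===== PRECONDITION & SPEC =====
-- Pre_ excludes depth ≤ -2, where the Python A raises ValueError (negative shift count).
def Pre_format_tree_structure (depth : Int) : Prop := -1 ≤ depth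
instance (depth : Int) : Decidable (Pre_format_tree_structure depth) := by
  unfold Pre_format_tree_structure; infer_instance
def pvWitness_format_tree_structure : Int := (2)
def Spec_format_tree_structure (depth : Int) (out : String) : Prop := out = format_tree_structure_alt depth
instance (depth : Int) (out : String) : Decidable (Spec_format_tree_structure depth out) := by unfold Spec_format_tree_structure; infer_instance

-- ===== CLAIM (what is proved, stated in full; the proofs are below) =====
def Claim_equal_format_tree_structure : Prop := ∀ (depth : Int), Dom_format_tree_structure depth → Pre_format_tree_structure depth → Spec_format_tree_structure depth (format_tree_structure depth)

-- ===== LEMMAS AND PROOFS =====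

-- first and last element of the per-level index range, in closed form
theorem pv_level_line_eq (lv : Int) (h0 : 0 ≤ lv) :
    PySem.List.pyGetD (PySem.List.pyRange (2 ^ lv.toNat - 1) (2 ^ (lv + 1).toNat - 1) 1) 0 0
      = (2 : Int) ^ lv.toNat - 1 ∧
    PySem.List.pyGetD (PySem.List.pyRange (2 ^ lv.toNat - 1) (2 ^ (lv + 1).toNat - 1) 1) (-1) 0
      = (2 : Int) ^ (lv + 1).toNat - 2 := by
  have hn : (lv + 1).toNat = lv.toNat + 1 := by omega
  have hpos : (0 : Int) < 2 ^ lv.toNat := pow_pos (by norm_num) _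
  have hlt : (2 : Int) ^ lv.toNat - 1 < 2 ^ (lv + 1).toNat - 1 := by
    rw [hn, pow_succ]; nlinarith
  constructor
  · rw [PySem.List.pyRange_one_cons hlt, PySem.List.pyGetD_zero_cons]
  · have hsplit : PySem.List.pyRange (2 ^ lv.toNat - 1) (2 ^ (lv + 1).toNat - 1) 1
        = PySem.List.pyRange (2 ^ lv.toNat - 1) (2 ^ (lv + 1).toNat - 2) 1
          ++ [(2 : Int) ^ (lv + 1).toNat - 2] := by
      have := PySem.List.pyRange_one_succ_right (a := 2 ^ lv.toNat - 1)
        (b := 2 ^ (lv + 1).toNat - 2) (by omega)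
      have harg : (2 : Int) ^ (lv + 1).toNat - 2 + 1 = 2 ^ (lv + 1).toNat - 1 := by ring
      rw [harg] at this
      exact this
    rw [hsplit, PySem.List.pyGetD_neg_one_append_singleton]

-- ===== VERDICT (by name: the statement is the Claim_ definition above) =====
theorem format_tree_structure_spec : Claim_equal_format_tree_structure := by
  intro depth _ _
  unfold Spec_format_tree_structure format_tree_structure format_tree_structure_alt
  simp only [PySem.List.foldl_append_singleton_eq_map, List.singleton_append]
  congr 1
  congr 1
  apply List.map_congr_left
  intro lv hlv
  have h0 : 0 ≤ lv := (PySem.List.mem_pyRange_one.mp hlv).1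
  obtain ⟨h1, h2⟩ := pv_level_line_eq lv h0
  rw [h1, h2]
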